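-- pv_equiv track=rewrite | github.com/sp8cky/Primes | src/primality/helpers.py | is_fermat_number
-- ===== SOURCE A (Python) =====
-- def is_fermat_number(n: int) -> bool:
--     if n < 3: return False
--     k = 0
--     while True:
--         fermat_candidate = (1 << (1 << k)) + 1  # Berechnet 2^(2^k) + 1 effizient
--         if fermat_candidate == n:
--             return True
--         if fermat_candidate > n:  # Kein weiteres k kann n ergeben
--             return False
--         k += 1
-- ===== SOURCE B (Python) =====
-- def is_fermat_number(n: int) -> bool:
--     # Closed-form bit test: n is Fermat iff n-1 == 2^(2^k), i.e. n-1 is a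
--     # power of two whose exponent is itself a power of two (exponent >= 1 here).
--     if n < 3:
--         return False
--     m = n - 1
--     if m & (m - 1) != 0:
--         return False
--     e = m.bit_length() - 1
--     return e & (e - 1) == 0
-- ===== Notes on version B (the rewrite author's own statement) =====
-- stated objective: simpler
-- what changed: Replaced A's loop that generates successive Fermat candidates 2^(2^k)+1 with a direct bit-manipulation test: n-1 must be a power of two (m & (m-1) == 0) whose exponent (bit_length-1) is itself a power of two.
import Mathlib
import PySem

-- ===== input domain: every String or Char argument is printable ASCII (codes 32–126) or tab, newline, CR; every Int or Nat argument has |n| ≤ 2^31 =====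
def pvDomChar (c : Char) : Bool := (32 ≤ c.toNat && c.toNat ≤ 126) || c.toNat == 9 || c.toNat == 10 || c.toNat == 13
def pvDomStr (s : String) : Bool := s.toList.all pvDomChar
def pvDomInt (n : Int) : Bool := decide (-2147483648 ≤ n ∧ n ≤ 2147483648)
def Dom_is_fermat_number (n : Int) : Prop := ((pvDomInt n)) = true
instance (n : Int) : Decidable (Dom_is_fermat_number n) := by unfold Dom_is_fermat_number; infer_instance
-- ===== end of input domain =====

-- B replaces A's candidate-generating loop with a closed-form bit test (objective: simpler).

-- ===== PORT A =====
-- A's while-loop: fuel is only a termination bound; for n ≥ 3 the loop always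
-- returns before `fuel = n.toNat` steps are used (candidate at step k is ≥ 2^(k+1)+1 > k+1).
def fermatLoop (n : Int) (k : Nat) (fuel : Nat) : Bool :=
  match fuel with
  | 0 => false
  | fuel + 1 =>
    let fermat_candidate : Int := 2 ^ (2 ^ k) + 1   -- (1 << (1 << k)) + 1
    if fermat_candidate = n then true
    else if fermat_candidate > n then false
    else fermatLoop n (k + 1) fuel

def is_fermat_number (n : Int) : Bool :=
  if n < 3 then false else fermatLoop n 0 n.toNat

-- ===== PORT B =====
def is_fermat_number_alt (n : Int) : Bool :=
  if n < 3 then false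
  else
    let m : Nat := (n - 1).toNat   -- n ≥ 3, so n-1 ≥ 2 and toNat is exact
    if m &&& (m - 1) ≠ 0 then false
    else
      let e : Nat := Nat.log2 m    -- m.bit_length() - 1 for m ≥ 1
      e &&& (e - 1) == 0

-- ===== PRECONDITION & SPEC =====
def Spec_is_fermat_number (n : Int) (out : Bool) : Prop := out = is_fermat_number_alt n
instance (n : Int) (out : Bool) : Decidable (Spec_is_fermat_number n out) := by unfold Spec_is_fermat_number; infer_instance

-- ===== CLAIM (what is proved, stated in full; the proofs are below) =====
def Claim_equal_is_fermat_number : Prop := ∀ (n : Int), Dom_is_fermat_number n → Spec_is_fermat_number n (is_fermat_number n)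

-- ===== LEMMAS AND PROOFS =====

-- In-domain characterisation of A: the only Fermat numbers ≤ 2^31 are 3,5,17,257,65537.
theorem fermatLoop_char (n : Int) (f : Nat) (h3 : 3 ≤ n) (hub : n ≤ 2147483648) :
    fermatLoop n 0 (f + 6) =
      decide (n = 3 ∨ n = 5 ∨ n = 17 ∨ n = 257 ∨ n = 65537) := by
  simp only [fermatLoop]
  norm_num
  have hne : ¬((4294967297:Int) = n) := by omega
  have hlt : n < 4294967297 := by omega
  by_cases e1 : n = 3 <;> by_cases e2 : n = 5 <;> by_cases e3 : n = 17 <;>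
    by_cases e4 : n = 257 <;> by_cases e5 : n = 65537 <;> simp_all
  omega

theorem is_fermat_number_char (n : Int) (h3 : 3 ≤ n) (hub : n ≤ 2147483648) :
    is_fermat_number n =
      decide (n = 3 ∨ n = 5 ∨ n = 17 ∨ n = 257 ∨ n = 65537) := by
  unfold is_fermat_number
  rw [if_neg (by omega)]
  have h6 : n.toNat = (n.toNat - 6) + 6 ∨ n.toNat < 6 := by omega
  rcases h6 with h | h
  · rw [h, fermatLoop_char n _ h3 hub]
  · -- small n: n ∈ {3,4,5}; check directly
    have h6 : n < 6 := by omega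
    have hub' : n ≤ 5 := by omega
    clear hub h
    interval_cases n <;> decide

-- testBit e x = true when 2^e ≤ x < 2^(e+1)
theorem testBit_of_bounds (e x : Nat) (h1 : 2 ^ e ≤ x) (h2 : x < 2 ^ (e + 1)) :
    x.testBit e = true := by
  rw [Nat.testBit_eq_decide_div_mod_eq]
  have : x / 2 ^ e = 1 := Nat.div_eq_of_lt_le (by simpa using h1) (by simpa [Nat.pow_succ, Nat.mul_comm] using h2)
  simp [this]

-- m & (m-1) = 0 forces m to be exactly 2^(log2 m), for m ≥ 1.
theorem pow_of_land_zero (m : Nat) (hm : 1 ≤ m) (h : m &&& (m - 1) = 0) :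
    m = 2 ^ Nat.log2 m := by
  by_contra hne
  have hle : 2 ^ Nat.log2 m ≤ m := Nat.log2_self_le (by omega)
  have hlt : m < 2 ^ (Nat.log2 m + 1) := Nat.lt_log2_self
  have hgt : 2 ^ Nat.log2 m ≤ m - 1 := by omega
  have hb1 : m.testBit m.log2 = true := testBit_of_bounds _ _ hle hlt
  have hb2 : (m - 1).testBit m.log2 = true := testBit_of_bounds _ _ hgt (by omega)
  have : (m &&& (m - 1)).testBit m.log2 = true := by
    rw [Nat.testBit_and, hb1, hb2]; rfl
  rw [h] at this
  simp at this

theorem is_fermat_number_alt_char (n : Int) (h3 : 3 ≤ n) (hub : n ≤ 2147483648) :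
    is_fermat_number_alt n =
      decide (n = 3 ∨ n = 5 ∨ n = 17 ∨ n = 257 ∨ n = 65537) := by
  unfold is_fermat_number_alt
  rw [if_neg (by omega)]
  have hm : (n - 1).toNat = (n - 1).toNat := rfl
  generalize hmdef : (n - 1).toNat = m
  have hn : n = (m : Int) + 1 := by omega
  have hm2 : 2 ≤ m := by omega
  have hmub : m ≤ 2147483647 := by omega
  by_cases hland : m &&& (m - 1) = 0
  · have hpow : m = 2 ^ Nat.log2 m := pow_of_land_zero m (by omega) hland
    simp only [hland, ne_eq, not_true_eq_false, if_false]
    generalize hE : Nat.log2 m = e at hpow ⊢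
    have he31 : e ≤ 31 := by
      by_contra hgt
      have : 2 ^ 32 ≤ 2 ^ e := Nat.pow_le_pow_right (by omega) (by omega)
      omega
    have he1 : 1 ≤ e := by
      by_contra h0
      have : e = 0 := by omega
      rw [this] at hpow; omega
    subst hn
    interval_cases e <;> norm_num at hpow ⊢ <;> subst hpow <;> decide
  · rw [if_pos hland]
    have hnot : ¬ (n = 3 ∨ n = 5 ∨ n = 17 ∨ n = 257 ∨ n = 65537) := by
      rintro (h | h | h | h | h) <;> subst h <;> norm_num at hmdef <;>
        subst hmdef <;> exact hland (by decide)
    simp [hnot]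

-- ===== VERDICT (by name: the statement is the Claim_ definition above) =====
theorem is_fermat_number_spec : Claim_equal_is_fermat_number := by
  intro n hdom
  unfold Spec_is_fermat_number
  have hdom' : -2147483648 ≤ n ∧ n ≤ 2147483648 := by
    simpa [Dom_is_fermat_number, pvDomInt] using hdom
  by_cases h3 : n < 3
  · simp [is_fermat_number, is_fermat_number_alt, h3]
  · rw [is_fermat_number_char n (by omega) hdom'.2,
        is_fermat_number_alt_char n (by omega) hdom'.2]
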